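-- pv_equiv track=rewrite | github.com/kvengl/lessons | 28/9/TheRabbitsFoot.py | fill_matrix_for_encode
-- ===== SOURCE A (Python) =====
-- def fill_matrix_for_encode(s, row_len, col_len):
--     matrix = []
--     s_ind = 0
--     for i in range(row_len):
--         matrix.append([])
--         for j in range(col_len):
--             if s_ind < len(s):
--                 matrix[i].append(s[s_ind])
--                 s_ind += 1
--             else:
--                 matrix[i].append("")
--     return matrix
-- ===== SOURCE B (Python) =====
-- def fill_matrix_for_encode(s, row_len, col_len):
--     rows = max(row_len, 0)
--     cols = max(col_len, 0)
--     total = rows * cols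
--     flat = list(s)[:total]
--     flat.extend([""] * (total - len(flat)))
--     return [flat[r * cols:(r + 1) * cols] for r in range(rows)]
-- ===== Notes on version B (the rewrite author's own statement) =====
-- stated objective: alternative
-- what changed: Replaces the fused per-cell nested loop with an explicit s_ind counter and bound check by a two-stage build-then-reshape: first materialize one flat padded list of total = rows*cols cells, then slice it into col_len-sized chunks.
import Mathlib
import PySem

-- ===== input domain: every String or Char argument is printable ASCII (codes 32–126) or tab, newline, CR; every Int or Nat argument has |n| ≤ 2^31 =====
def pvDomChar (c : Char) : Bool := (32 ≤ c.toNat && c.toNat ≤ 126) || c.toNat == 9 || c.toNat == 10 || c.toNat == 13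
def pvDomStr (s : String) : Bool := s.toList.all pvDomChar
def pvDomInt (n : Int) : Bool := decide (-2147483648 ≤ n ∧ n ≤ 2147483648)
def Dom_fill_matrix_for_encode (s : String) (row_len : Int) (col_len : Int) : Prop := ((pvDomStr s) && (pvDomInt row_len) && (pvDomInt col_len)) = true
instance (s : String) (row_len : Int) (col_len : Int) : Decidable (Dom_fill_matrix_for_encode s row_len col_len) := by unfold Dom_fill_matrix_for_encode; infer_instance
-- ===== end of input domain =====

-- B replaces A's fused per-cell nested loop (running s_ind with a bound check) by a
-- build-then-reshape pair of passes: one flat padded list of rows*cols cells, then chunking.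

-- ===== PORT A =====
-- A-side helper: one step of the inner 'for j in range(col_len)' loop. 's[s_ind]' is ported
-- as getD, exact here because the guard guarantees 0 ≤ s_ind < len(s) (default never used).
def pvInnerStep (L : List String) (rs : List String × Int) (_j : Int) : List String × Int :=
  if rs.2 < (L.length : Int) then (rs.1 ++ [L.getD rs.2.toNat ""], rs.2 + 1)
  else (rs.1 ++ [""], rs.2)

-- A-side helper: one step of the outer 'for i in range(row_len)' loop (append row, carry s_ind).
def pvOuterStep (L : List String) (col_len : Int) (st : List (List String) × Int) (_i : Int) :
    List (List String) × Int :=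
  let inner := (PySem.List.pyRange 0 col_len 1).foldl (pvInnerStep L) ([], st.2)
  (st.1 ++ [inner.1], inner.2)

def fill_matrix_for_encode (s : String) (row_len : Int) (col_len : Int) : List (List String) :=
  let L := s.toList.map (fun c => String.ofList [c])
  ((PySem.List.pyRange 0 row_len 1).foldl (pvOuterStep L col_len) ([], 0)).1

-- ===== PORT B =====
def fill_matrix_for_encode_alt (s : String) (row_len : Int) (col_len : Int) : List (List String) :=
  let rows := max row_len 0
  let cols := max col_len 0
  let total := rows * cols
  let flat0 := PySem.List.slice (s.toList.map (fun c => String.ofList [c])) none (some total)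
  let flat := flat0 ++ List.replicate (total - (flat0.length : Int)).toNat ""
  (PySem.List.pyRange 0 rows 1).map
    (fun r => PySem.List.slice flat (some (r * cols)) (some ((r + 1) * cols)))

-- ===== PRECONDITION & SPEC =====
def Spec_fill_matrix_for_encode (s : String) (row_len : Int) (col_len : Int) (out : List (List String)) : Prop := out = fill_matrix_for_encode_alt s row_len col_len
instance (s : String) (row_len : Int) (col_len : Int) (out : List (List String)) : Decidable (Spec_fill_matrix_for_encode s row_len col_len out) := by unfold Spec_fill_matrix_for_encode; infer_instance

-- ===== CLAIM (what is proved, stated in full; the proofs are below) =====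
def Claim_equal_fill_matrix_for_encode : Prop := ∀ (s : String) (row_len : Int) (col_len : Int), Dom_fill_matrix_for_encode s row_len col_len → Spec_fill_matrix_for_encode s row_len col_len (fill_matrix_for_encode s row_len col_len)

-- ===== LEMMAS AND PROOFS =====

-- range over an Int bound is the range over its toNat
lemma pyRange_zero_toNat (b : Int) :
    PySem.List.pyRange 0 b 1 = PySem.List.pyRange 0 ((b.toNat : Int)) 1 := by
  have h : (max b 0).toNat = b.toNat := by omega
  simp [PySem.List.pyRange_one, h]

-- the canonical cell value: row i, column j
def pvCell (L : List String) (C i j : Nat) : String :=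
  if i * C + j < L.length then L.getD (i * C + j) "" else ""

-- inner loop: starting at index si ≤ len, range C appends exactly the si-offset cells
lemma inner_spec (L : List String) (C : Nat) :
    ∀ (si : Nat) (acc : List String), si ≤ L.length →
    (PySem.List.pyRange 0 ((C : Nat) : Int) 1).foldl (pvInnerStep L) (acc, (si : Int)) =
      (acc ++ (List.range C).map
        (fun j => if si + j < L.length then L.getD (si + j) "" else ""),
       ((min (si + C) L.length : Nat) : Int)) := by
  induction C with
  | zero => intro si acc h; simp [PySem.List.pyRange_one_eq_nil, Nat.min_eq_left h]
  | succ C ih =>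
      intro si acc h
      have hc : ((C + 1 : Nat) : Int) = (C : Int) + 1 := by push_cast; ring
      rw [hc, PySem.List.pyRange_one_succ_right (by positivity), List.foldl_append,
        ih si acc h]
      simp only [List.foldl_cons, List.foldl_nil, pvInnerStep]
      by_cases hlt : si + C < L.length
      · have : ((min (si + C) L.length : Nat) : Int) < (L.length : Int) := by
          omega
        rw [if_pos this]
        have hmin : min (si + C) L.length = si + C := by omega
        have hmin' : min (si + (C + 1)) L.length = si + C + 1 := by omega
        rw [hmin, hmin', Prod.mk.injEq]
        refine ⟨?_, by push_cast; ring⟩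
        rw [List.range_succ, List.map_append, List.map_singleton, if_pos hlt,
          ← List.append_assoc]
        have hidx : ((si : Int) + (C : Int)).toNat = si + C := by omega
        simp [hidx]
      · have hmin : min (si + C) L.length = L.length := by omega
        have : ¬ ((min (si + C) L.length : Nat) : Int) < (L.length : Int) := by omega
        rw [if_neg this]
        have hmin' : min (si + (C + 1)) L.length = L.length := by omega
        rw [hmin, hmin', Prod.mk.injEq]
        refine ⟨?_, rfl⟩
        rw [List.range_succ, List.map_append, List.map_singleton, if_neg hlt,
          ← List.append_assoc]

-- outer loop: after R rows the matrix is the table of cells and s_ind = min (R*C) len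
lemma outer_spec (L : List String) (C : Nat) (R : Nat) :
    (PySem.List.pyRange 0 ((R : Nat) : Int) 1).foldl
        (pvOuterStep L ((C : Nat) : Int)) ([], 0) =
      ((List.range R).map (fun i => (List.range C).map (pvCell L C i)),
       ((min (R * C) L.length : Nat) : Int)) := by
  induction R with
  | zero => simp [PySem.List.pyRange_one_eq_nil]
  | succ R ih =>
      have hc : ((R + 1 : Nat) : Int) = (R : Int) + 1 := by push_cast; ring
      rw [hc, PySem.List.pyRange_one_succ_right (by positivity), List.foldl_append, ih]
      simp only [List.foldl_cons, List.foldl_nil, pvOuterStep]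
      have hsi : min (R * C) L.length ≤ L.length := by omega
      rw [inner_spec L C (min (R * C) L.length) [] hsi]
      simp only [List.nil_append]
      rw [Prod.mk.injEq]
      have hmul : (R + 1) * C = R * C + C := by ring
      refine ⟨?_, by congr 1; omega⟩
      rw [List.range_succ, List.map_append, List.map_singleton]
      congr 1
      congr 1
      apply List.map_congr_left
      intro j _
      simp only [pvCell]
      by_cases hb : R * C + j < L.length
      · have h1 : min (R * C) L.length = R * C := by omega
        rw [h1, if_pos hb]
      · rw [if_neg hb]
        by_cases h2 : min (R * C) L.length + j < L.length
        · exfalso; omega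
        · rw [if_neg h2]

-- B's padded flat list, in Nat form
def pvFlat (L : List String) (T : Nat) : List String :=
  L.take T ++ List.replicate (T - L.length) ""

lemma pvFlat_length (L : List String) (T : Nat) : (pvFlat L T).length = T := by
  simp [pvFlat]; omega

lemma pvFlat_getD (L : List String) (T p : Nat) (hp : p < T) :
    (pvFlat L T).getD p "" = if p < L.length then L.getD p "" else "" := by
  unfold pvFlat
  by_cases h : p < L.length
  · rw [if_pos h]
    rw [List.getD_eq_getElem _ _ (by simp; omega), List.getD_eq_getElem _ _ h]
    rw [List.getElem_append_left (by simp; omega)]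
    simp
  · rw [if_neg h]
    rw [List.getD_eq_getElem _ _ (by simp; omega)]
    rw [List.getElem_append_right (by simp; omega)]
    simp

-- B's i-th chunk equals the table row, for i < R
lemma chunk_eq_row (L : List String) (C R i : Nat) (hi : i < R) :
    (List.take C (List.drop (i * C) (pvFlat L (R * C)))) =
      (List.range C).map (pvCell L C i) := by
  apply List.ext_getElem
  · simp [pvFlat_length]
    have : i * C + C ≤ R * C := by
      calc i * C + C = (i + 1) * C := by ring
        _ ≤ R * C := Nat.mul_le_mul_right C hi
    omega
  · intro j h1 h2
    simp only [List.getElem_take, List.getElem_drop, List.getElem_map, List.getElem_range]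
    have hlen : (pvFlat L (R * C)).length = R * C := pvFlat_length L (R * C)
    have hj : j < C := by simpa using h2
    have hp : i * C + j < R * C := by
      have : i * C + C ≤ R * C := by
        calc i * C + C = (i + 1) * C := by ring
          _ ≤ R * C := Nat.mul_le_mul_right C hi
      omega
    have := pvFlat_getD L (R * C) (i * C + j) hp
    rw [List.getD_eq_getElem _ _ (by omega)] at this
    rw [this]
    rfl

-- ===== VERDICT (by name: the statement is the Claim_ definition above) =====
theorem fill_matrix_for_encode_spec : Claim_equal_fill_matrix_for_encode := by
  intro s row_len col_len _
  unfold Spec_fill_matrix_for_encode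
  unfold fill_matrix_for_encode fill_matrix_for_encode_alt
  set L := s.toList.map (fun c => String.ofList [c]) with hL
  set R := row_len.toNat
  set C := col_len.toNat
  have hrow : max row_len 0 = ((R : Nat) : Int) := by omega
  have hcol : max col_len 0 = ((C : Nat) : Int) := by omega
  have hR : PySem.List.pyRange 0 row_len 1 = PySem.List.pyRange 0 ((R : Nat) : Int) 1 :=
    pyRange_zero_toNat row_len
  have hC : PySem.List.pyRange 0 col_len 1 = PySem.List.pyRange 0 ((C : Nat) : Int) 1 :=
    pyRange_zero_toNat col_len
  have hstep : pvOuterStep L col_len = pvOuterStep L ((C : Nat) : Int) := by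
    funext st i; simp only [pvOuterStep, hC]
  simp only [hR, hrow, hcol, hstep]
  rw [outer_spec L C R]
  -- now reduce B's side
  have htot : ((R : Nat) : Int) * ((C : Nat) : Int) = ((R * C : Nat) : Int) := by push_cast; ring
  rw [htot, PySem.List.slice_to_natCast]
  have hflat :
      L.take (R * C) ++ List.replicate
          (((R * C : Nat) : Int) - ((L.take (R * C)).length : Int)).toNat "" =
        pvFlat L (R * C) := by
    unfold pvFlat
    congr 1
    congr 1
    simp
    omega
  rw [hflat]
  rw [PySem.List.pyRange_one]
  simp only [List.map_map]
  have hrange : (((R : Nat) : Int) - 0).toNat = R := by omega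
  rw [hrange]
  apply List.map_congr_left
  intro i hi
  simp only [Function.comp]
  rw [List.mem_range] at hi
  have h1 : (0 + (i : Int)) * ((C : Nat) : Int) = (((i * C : Nat) : Int)) := by push_cast; ring
  have h2 : (0 + (i : Int) + 1) * ((C : Nat) : Int) = (((i * C : Nat) : Int)) + ((C : Nat) : Int) := by
    push_cast; ring
  rw [h1, h2, PySem.List.slice_natCast_add]
  exact (chunk_eq_row L C R i hi).symm
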